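-- pv_equiv track=rewrite | github.com/AmitabhainArunachala/dharma_swarm | scripts/merge_snapshot.py | parse_git_counts
-- ===== SOURCE A (Python) =====
-- def parse_git_counts(porcelain: str) -> dict[str, int]:
--     staged = 0
--     unstaged = 0
--     untracked = 0
--     deleted = 0
--
--     for raw in porcelain.splitlines():
--         if not raw:
--             continue
--         if raw.startswith("?? "):
--             untracked += 1
--             continue
--
--         if len(raw) < 3:
--             continue
--
--         x = raw[0]
--         y = raw[1]
--
--         if x != " ":
--             staged += 1
--             if x == "D":
--                 deleted += 1
--
--         if y != " ":
--             unstaged += 1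
--             if y == "D":
--                 deleted += 1
--
--     total_dirty = staged + unstaged + untracked
--     return {
--         "staged": staged,
--         "unstaged": unstaged,
--         "untracked": untracked,
--         "deleted": deleted,
--         "total_dirty": total_dirty,
--     }
-- ===== SOURCE B (Python) =====
-- def parse_git_counts(porcelain: str) -> dict[str, int]:
--     lines = [l for l in porcelain.splitlines() if l]
--     untracked = sum(1 for l in lines if l.startswith("?? "))
--     status = [l for l in lines if len(l) >= 3 and not l.startswith("?? ")]
--     staged = sum(1 for l in status if l[0] != " ")
--     unstaged = sum(1 for l in status if l[1] != " ")
--     deleted = sum(1 for l in status if l[0] == "D") + sum(1 for l in status if l[1] == "D")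
--     return {
--         "staged": staged,
--         "unstaged": unstaged,
--         "untracked": untracked,
--         "deleted": deleted,
--         "total_dirty": staged + unstaged + untracked,
--     }
-- ===== Notes on version B (the rewrite author's own statement) =====
-- stated objective: alternative
-- what changed: Replaces the single four-accumulator loop with independent filtered passes: a nonempty-line list, a count of untracked-prefixed lines, and a status subset from which staged/unstaged/deleted are derived by separate count scans.
import Mathlib
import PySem

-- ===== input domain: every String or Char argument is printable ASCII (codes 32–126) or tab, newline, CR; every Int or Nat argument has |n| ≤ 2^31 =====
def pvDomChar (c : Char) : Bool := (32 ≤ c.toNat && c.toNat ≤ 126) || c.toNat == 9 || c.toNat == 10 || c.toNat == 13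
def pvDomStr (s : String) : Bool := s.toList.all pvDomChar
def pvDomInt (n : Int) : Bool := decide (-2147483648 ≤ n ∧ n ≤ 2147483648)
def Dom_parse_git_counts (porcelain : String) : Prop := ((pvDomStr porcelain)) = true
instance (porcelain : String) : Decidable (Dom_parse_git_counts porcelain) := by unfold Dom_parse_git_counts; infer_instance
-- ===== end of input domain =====

-- B replaces A's single four-accumulator loop with independent filtered passes
-- (nonempty lines, untracked count, status subset, per-category counts); return value only.

-- ===== PORT A =====
-- A's for-loop over splitlines, carrying the four counters (staged, unstaged, untracked, deleted).
def pvLoopA : List String → Int → Int → Int → Int → Int × Int × Int × Int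
  | [], s, u, t, d => (s, u, t, d)
  | raw :: rest, s, u, t, d =>
    if raw == "" then pvLoopA rest s u t d
    else if PySem.Str.startswith raw "?? " then pvLoopA rest s u (t + 1) d
    else if PySem.Str.len raw < 3 then pvLoopA rest s u t d
    else
      let x := PySem.Str.pyGet? raw 0
      let y := PySem.Str.pyGet? raw 1
      let sd := if x != some ' ' then (s + 1, if x == some 'D' then d + 1 else d) else (s, d)
      let ud := if y != some ' ' then (u + 1, if y == some 'D' then sd.2 + 1 else sd.2) else (u, sd.2)
      pvLoopA rest sd.1 ud.1 t ud.2

def parse_git_counts (porcelain : String) : List (String × Int) :=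
  let r := pvLoopA (PySem.Str.splitlines porcelain) 0 0 0 0
  [("staged", r.1), ("unstaged", r.2.1), ("untracked", r.2.2.1), ("deleted", r.2.2.2),
   ("total_dirty", r.1 + r.2.1 + r.2.2.1)]

-- ===== PORT B =====
def parse_git_counts_alt (porcelain : String) : List (String × Int) :=
  let lines := (PySem.Str.splitlines porcelain).filter (fun l => l != "")
  let untracked : Int := (lines.countP (fun l => PySem.Str.startswith l "?? ") : Int)
  let status := lines.filter (fun l => decide (3 ≤ PySem.Str.len l) && !PySem.Str.startswith l "?? ")
  let staged : Int := (status.countP (fun l => PySem.Str.pyGet? l 0 != some ' ') : Int)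
  let unstaged : Int := (status.countP (fun l => PySem.Str.pyGet? l 1 != some ' ') : Int)
  let deleted : Int := (status.countP (fun l => PySem.Str.pyGet? l 0 == some 'D') : Int)
                     + (status.countP (fun l => PySem.Str.pyGet? l 1 == some 'D') : Int)
  [("staged", staged), ("unstaged", unstaged), ("untracked", untracked), ("deleted", deleted),
   ("total_dirty", staged + unstaged + untracked)]

-- ===== PRECONDITION & SPEC =====
def Spec_parse_git_counts (porcelain : String) (out : List (String × Int)) : Prop := out = parse_git_counts_alt porcelain
instance (porcelain : String) (out : List (String × Int)) : Decidable (Spec_parse_git_counts porcelain out) := by unfold Spec_parse_git_counts; infer_instance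

-- ===== CLAIM (what is proved, stated in full; the proofs are below) =====
def Claim_equal_parse_git_counts : Prop := ∀ (porcelain : String), Dom_parse_git_counts porcelain → Spec_parse_git_counts porcelain (parse_git_counts porcelain)

-- ===== LEMMAS AND PROOFS =====

lemma pvLoopA_eq (ls : List String) (s u t d : Int) :
    pvLoopA ls s u t d =
      ( s + (((ls.filter (fun l => l != "")).filter (fun l => decide (3 ≤ PySem.Str.len l) && !PySem.Str.startswith l "?? ")).countP (fun l => PySem.Str.pyGet? l 0 != some ' ') : Int),
        u + (((ls.filter (fun l => l != "")).filter (fun l => decide (3 ≤ PySem.Str.len l) && !PySem.Str.startswith l "?? ")).countP (fun l => PySem.Str.pyGet? l 1 != some ' ') : Int),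
        t + ((ls.filter (fun l => l != "")).countP (fun l => PySem.Str.startswith l "?? ") : Int),
        d + ((((ls.filter (fun l => l != "")).filter (fun l => decide (3 ≤ PySem.Str.len l) && !PySem.Str.startswith l "?? ")).countP (fun l => PySem.Str.pyGet? l 0 == some 'D') : Int)
           + (((ls.filter (fun l => l != "")).filter (fun l => decide (3 ≤ PySem.Str.len l) && !PySem.Str.startswith l "?? ")).countP (fun l => PySem.Str.pyGet? l 1 == some 'D') : Int)) ) := by
  induction ls generalizing s u t d with
  | nil => simp [pvLoopA]
  | cons raw rest ih =>
    by_cases h1 : raw = ""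
    · subst h1
      simp [pvLoopA, PySem.Str.startswith, ih]
    · by_cases h2 : PySem.Chars.startswith raw.toList ['?', '?', ' '] = true
      · simp [pvLoopA, h1, h2, ih, Prod.mk.injEq]
        omega
      · by_cases h3 : raw.length < 3
        · have h3' : ¬ 3 ≤ raw.length := by omega
          simp [pvLoopA, h1, h2, h3, h3', ih]
        · have h3' : 3 ≤ raw.length := by omega
          simp [pvLoopA, h1, h2, h3, h3', ih, List.countP_cons, Prod.mk.injEq]
          split_ifs <;> simp_all <;> omega
-- ===== VERDICT (by name: the statement is the Claim_ definition above) =====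
theorem parse_git_counts_spec : Claim_equal_parse_git_counts := by
  intro porcelain _
  unfold Spec_parse_git_counts parse_git_counts parse_git_counts_alt
  simp [pvLoopA_eq]
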